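-- pv_equiv track=rewrite | github.com/pytorch/FBGEMM | fbgemm_gpu/test/jagged/unique_indices_test.py | hash_size_cumsum_to_offsets
-- ===== SOURCE A (Python) =====
-- from typing import List
--
-- def hash_size_cumsum_to_offsets(hash_size_cum_sum_list: List[int]) -> List[int]:
--     hash_size_offsets_list = [0]
--     count = 0
--     for f in range(1, len(hash_size_cum_sum_list)):
--         count = count + 1
--         if hash_size_cum_sum_list[f] == hash_size_cum_sum_list[f - 1]:
--             curr_offsets = hash_size_offsets_list[-1]
--             hash_size_offsets_list.append(curr_offsets)
--         else:
--             hash_size_offsets_list.append(count)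
--     hash_size_offsets_list[-1] = count
--     return hash_size_offsets_list
-- ===== SOURCE B (Python) =====
-- from typing import List
--
-- def hash_size_cumsum_to_offsets(hash_size_cum_sum_list: List[int]) -> List[int]:
--     xs = hash_size_cum_sum_list
--     n = len(xs)
--     # positions where the cumulative sum changes
--     changes = [f for f in range(1, n) if xs[f] != xs[f - 1]]
--     # the offsets list is a step function: value c from each change position c
--     # up to (excluding) the next change position
--     starts = [0] + changes
--     ends = changes + [max(n, 1)]
--     out = []
--     for s, e in zip(starts, ends):
--         out.extend([s] * (e - s))
--     out[-1] = len(out) - 1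
--     return out
-- ===== Notes on version B (the rewrite author's own statement) =====
-- stated objective: alternative
-- what changed: B first collects the change positions of the cumulative list, then fills the offsets list segment-by-segment as a step function (zip of segment starts/ends + extend), instead of A's element-at-a-time loop carrying the previous offset and a counter.
import Mathlib
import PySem

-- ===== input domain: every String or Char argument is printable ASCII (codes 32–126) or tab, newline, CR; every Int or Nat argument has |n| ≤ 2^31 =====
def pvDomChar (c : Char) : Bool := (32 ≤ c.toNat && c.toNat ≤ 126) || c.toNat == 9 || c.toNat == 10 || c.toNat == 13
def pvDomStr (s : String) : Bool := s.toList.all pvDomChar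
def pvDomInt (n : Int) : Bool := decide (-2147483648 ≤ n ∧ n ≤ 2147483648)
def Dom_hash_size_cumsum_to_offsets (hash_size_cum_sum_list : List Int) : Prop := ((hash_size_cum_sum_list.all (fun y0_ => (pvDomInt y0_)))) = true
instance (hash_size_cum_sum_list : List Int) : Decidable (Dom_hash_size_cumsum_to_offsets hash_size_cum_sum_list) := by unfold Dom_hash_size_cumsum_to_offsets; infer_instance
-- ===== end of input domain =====

-- B rebuilds the offsets list as a step function filled segment-by-segment from the
-- change positions (objective: alternative decomposition, two passes, no per-element carry).

-- ===== PORT A =====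
-- literal port of A: a fold over range(1, n) carrying (offsets list, count),
-- then hash_size_offsets_list[-1] = count
def hash_size_cumsum_to_offsets (hash_size_cum_sum_list : List Int) : List Int :=
  let st :=
    (PySem.List.pyRange 1 (hash_size_cum_sum_list.length : Int) 1).foldl
      (fun (st : List Int × Int) f =>
        let count := st.2 + 1
        if PySem.List.pyGetD hash_size_cum_sum_list f 0
             = PySem.List.pyGetD hash_size_cum_sum_list (f - 1) 0 then
          let curr_offsets := PySem.List.pyGetD st.1 (-1) 0
          (st.1 ++ [curr_offsets], count)
        else
          (st.1 ++ [count], count))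
      ([0], 0)
  PySem.List.pySetD st.1 (-1) st.2

-- ===== PORT B =====
-- literal port of Source B: change positions, then segment fill via zip/extend,
-- then out[-1] = len(out) - 1
def hash_size_cumsum_to_offsets_alt (hash_size_cum_sum_list : List Int) : List Int :=
  let xs := hash_size_cum_sum_list
  let n : Int := xs.length
  let changes :=
    (PySem.List.pyRange 1 n 1).filter
      (fun f => !(PySem.List.pyGetD xs f 0 == PySem.List.pyGetD xs (f - 1) 0))
  let starts := 0 :: changes
  let ends := changes ++ [max n 1]
  let out :=
    (starts.zip ends).foldl
      (fun (acc : List Int) se => acc ++ List.replicate (se.2 - se.1).toNat se.1) []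
  PySem.List.pySetD out (-1) ((out.length : Int) - 1)

-- ===== PRECONDITION & SPEC =====
def Spec_hash_size_cumsum_to_offsets (hash_size_cum_sum_list : List Int) (out : List Int) : Prop := out = hash_size_cumsum_to_offsets_alt hash_size_cum_sum_list
instance (hash_size_cum_sum_list : List Int) (out : List Int) : Decidable (Spec_hash_size_cumsum_to_offsets hash_size_cum_sum_list out) := by unfold Spec_hash_size_cumsum_to_offsets; infer_instance

-- ===== CLAIM (what is proved, stated in full; the proofs are below) =====
def Claim_equal_hash_size_cumsum_to_offsets : Prop := ∀ (hash_size_cum_sum_list : List Int), Dom_hash_size_cumsum_to_offsets hash_size_cum_sum_list → Spec_hash_size_cumsum_to_offsets hash_size_cum_sum_list (hash_size_cumsum_to_offsets hash_size_cum_sum_list)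

-- ===== LEMMAS AND PROOFS =====

-- last-change table: lc xs i = the value A's loop appends at position i (before the final override)
def pvLc (xs : List Int) : Nat → Int
  | 0 => 0
  | (i+1) => if xs.getD (i+1) 0 = xs.getD i 0 then pvLc xs i else ((i : Int) + 1)

-- segment step function: from start s, fill with s up to the next change, etc., to m
def pvSeg (s : Int) : List Int → Int → List Int
  | [], m => List.replicate (m - s).toNat s
  | c :: cs, m => List.replicate (c - s).toNat s ++ pvSeg c cs m

theorem pvSeg_foldl (cs : List Int) (s m : Int) (acc : List Int) :
    ((s :: cs).zip (cs ++ [m])).foldl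
      (fun (acc : List Int) se => acc ++ List.replicate (se.2 - se.1).toNat se.1) acc
    = acc ++ pvSeg s cs m := by
  induction cs generalizing s acc with
  | nil => simp [pvSeg]
  | cons c cs ih => simp [pvSeg, List.zip_cons_cons, ih, List.append_assoc]

theorem pvSeg_snoc (cs : List Int) (s m c : Int) :
    pvSeg s (cs ++ [c]) m = pvSeg s cs c ++ List.replicate (m - c).toNat c := by
  induction cs generalizing s with
  | nil => simp [pvSeg]
  | cons d ds ih => simp [pvSeg, ih, List.append_assoc]

theorem pvSeg_succ (cs : List Int) (s m : Int) (hs : s ≤ m) (hcs : ∀ c ∈ cs, c ≤ m) :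
    pvSeg s cs (m + 1) = pvSeg s cs m ++ [cs.getLastD s] := by
  induction cs generalizing s with
  | nil =>
    have : (m + 1 - s).toNat = (m - s).toNat + 1 := by omega
    simp [pvSeg, this, List.replicate_succ']
  | cons c ds ih =>
    have hc : c ≤ m := hcs c (by simp)
    simp only [pvSeg, ih c hc (fun d hd => hcs d (by simp [hd])), List.append_assoc,
      List.getLastD_cons]

theorem pvA_loop (xs : List Int) (k : Nat) (hk : 1 ≤ k) :
    (PySem.List.pyRange 1 (k : Int) 1).foldl
      (fun (st : List Int × Int) f =>
        let count := st.2 + 1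
        if PySem.List.pyGetD xs f 0 = PySem.List.pyGetD xs (f - 1) 0 then
          (st.1 ++ [PySem.List.pyGetD st.1 (-1) 0], count)
        else
          (st.1 ++ [count], count))
      ([0], 0)
    = ((List.range k).map (pvLc xs), (k : Int) - 1) := by
  induction k with
  | zero => omega
  | succ k ih =>
    by_cases hk1 : 1 ≤ k
    · have hsplit : PySem.List.pyRange 1 ((k : Int) + 1) 1
          = PySem.List.pyRange 1 (k : Int) 1 ++ [(k : Int)] :=
        PySem.List.pyRange_one_succ_right (by exact_mod_cast hk1)
      push_cast
      rw [hsplit, List.foldl_append, ih hk1]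
      have hcast : (k : Int) - 1 = ((k - 1 : Nat) : Int) := by omega
      have hgk : PySem.List.pyGetD xs ((k : Int)) 0 = xs.getD k 0 :=
        PySem.List.pyGetD_natCast xs k 0
      have hgk1 : PySem.List.pyGetD xs ((k : Int) - 1) 0 = xs.getD (k - 1) 0 := by
        rw [hcast]; exact PySem.List.pyGetD_natCast xs (k - 1) 0
      have hne : ((List.range k).map (pvLc xs)) ≠ [] := by
        simp [List.range_eq_nil]; omega
      have hlast : PySem.List.pyGetD ((List.range k).map (pvLc xs)) (-1) 0
          = pvLc xs (k - 1) := by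
        rw [PySem.List.pyGetD_neg_one _ _ hne]
        rw [List.getLast_eq_getElem]
        simp only [List.length_map, List.length_range, List.getElem_map, List.getElem_range]
      obtain ⟨k', rfl⟩ : ∃ k', k = k' + 1 := ⟨k - 1, by omega⟩
      simp only [List.foldl_cons, List.foldl_nil, hgk, hgk1, hlast]
      rw [List.range_succ (n := k' + 1)]
      simp only [List.map_append, List.map_cons, List.map_nil]
      by_cases hch : xs.getD (k' + 1) 0 = xs.getD (k' + 1 - 1) 0
      · rw [if_pos hch]
        have : pvLc xs (k' + 1) = pvLc xs k' := by
          simp only [pvLc]; rw [if_pos (by simpa using hch)]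
        simp [this]
      · rw [if_neg hch]
        have : pvLc xs (k' + 1) = ((k' : Int) + 1) := by
          simp only [pvLc]; rw [if_neg (by simpa using hch)]
        simp [this]
    · have hk0 : k = 0 := by omega
      subst hk0
      simp [PySem.List.pyRange_one_eq_nil, List.range_one, pvLc]

theorem pvB_core (xs : List Int) (k : Nat) (hk : 1 ≤ k) :
    pvSeg 0 ((PySem.List.pyRange 1 (k : Int) 1).filter
        (fun f => !(PySem.List.pyGetD xs f 0 == PySem.List.pyGetD xs (f - 1) 0))) (k : Int)
      = (List.range k).map (pvLc xs)
    ∧ ((PySem.List.pyRange 1 (k : Int) 1).filter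
        (fun f => !(PySem.List.pyGetD xs f 0 == PySem.List.pyGetD xs (f - 1) 0))).getLastD 0
      = pvLc xs (k - 1) := by
  induction k with
  | zero => omega
  | succ k ih =>
    by_cases hk1 : 1 ≤ k
    · obtain ⟨ihseg, ihlast⟩ := ih hk1
      have hsplit : PySem.List.pyRange 1 ((k : Int) + 1) 1
          = PySem.List.pyRange 1 (k : Int) 1 ++ [(k : Int)] :=
        PySem.List.pyRange_one_succ_right (by exact_mod_cast hk1)
      have hcast : (k : Int) - 1 = ((k - 1 : Nat) : Int) := by omega
      have hgk : PySem.List.pyGetD xs ((k : Int)) 0 = xs.getD k 0 :=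
        PySem.List.pyGetD_natCast xs k 0
      have hgk1 : PySem.List.pyGetD xs ((k : Int) - 1) 0 = xs.getD (k - 1) 0 := by
        rw [hcast]; exact PySem.List.pyGetD_natCast xs (k - 1) 0
      have hbound : ∀ c ∈ (PySem.List.pyRange 1 (k : Int) 1).filter
          (fun f => !(PySem.List.pyGetD xs f 0 == PySem.List.pyGetD xs (f - 1) 0)),
          c ≤ (k : Int) := by
        intro c hc
        have := (PySem.List.mem_pyRange_one).1 (List.mem_of_mem_filter hc)
        omega
      obtain ⟨k', rfl⟩ : ∃ k', k = k' + 1 := ⟨k - 1, by omega⟩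
      push_cast at hsplit ⊢
      rw [hsplit, List.filter_append]
      simp only [List.filter_cons, List.filter_nil]
      by_cases hch : xs.getD (k' + 1) 0 = xs.getD (k' + 1 - 1) 0
      · have hcond : (!(PySem.List.pyGetD xs ((k' : Int) + 1) 0
            == PySem.List.pyGetD xs ((k' : Int) + 1 - 1) 0)) = false := by
          push_cast at hgk hgk1
          have hch' : xs[k' + 1]?.getD 0 = xs[k']?.getD 0 := by simpa using hch
          simp [hgk, hch']
        rw [hcond]
        simp only [Bool.false_eq_true, if_false]
        have hlc : pvLc xs (k' + 1) = pvLc xs k' := by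
          simp only [pvLc]; rw [if_pos (by simpa using hch)]
        push_cast at ihseg ihlast hbound ⊢
        rw [List.append_nil]
        constructor
        · rw [pvSeg_succ _ _ _ (by positivity) hbound, ihseg, ihlast]
          rw [List.range_succ (n := k' + 1), List.range_succ (n := k')]
          simp [hlc]
        · simpa [hlc] using ihlast
      · have hcond : (!(PySem.List.pyGetD xs ((k' : Int) + 1) 0
            == PySem.List.pyGetD xs ((k' : Int) + 1 - 1) 0)) = true := by
          push_cast at hgk hgk1
          have hch' : ¬ xs[k' + 1]?.getD 0 = xs[k']?.getD 0 := by simpa using hch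
          simp [hgk, hch']
        rw [hcond]
        simp only [if_true]
        have hlc : pvLc xs (k' + 1) = ((k' : Int) + 1) := by
          simp only [pvLc]; rw [if_neg (by simpa using hch)]
        push_cast at ihseg ihlast hbound ⊢
        constructor
        · rw [pvSeg_snoc, ihseg]
          have h1 : ((k' : Int) + 1 + 1 - ((k' : Int) + 1)).toNat = 1 := by omega
          rw [h1, List.range_succ (n := k' + 1), List.map_append]
          simp [hlc]
        · simp [hlc]
    · have hk0 : k = 0 := by omega
      subst hk0
      simp only [Nat.zero_add, Nat.cast_one]
      rw [PySem.List.pyRange_one_eq_nil (le_refl (1 : Int))]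
      simp [List.range_one, pvLc, pvSeg]

-- ===== VERDICT (by name: the statement is the Claim_ definition above) =====
theorem hash_size_cumsum_to_offsets_spec : Claim_equal_hash_size_cumsum_to_offsets := by
  intro xs _
  unfold Spec_hash_size_cumsum_to_offsets
  unfold hash_size_cumsum_to_offsets hash_size_cumsum_to_offsets_alt
  rcases Nat.eq_zero_or_pos xs.length with h0 | hpos
  · rw [List.length_eq_zero_iff] at h0
    subst h0
    decide
  · have hmax : max (xs.length : Int) 1 = (xs.length : Int) := by
      have : (1 : Int) ≤ xs.length := by exact_mod_cast hpos
      omega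
    simp only [hmax]
    rw [pvSeg_foldl]
    rw [pvA_loop xs xs.length hpos]
    obtain ⟨hB, -⟩ := pvB_core xs xs.length hpos
    rw [hB]
    simp only [List.nil_append, List.length_map, List.length_range]
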